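-- pv_equiv track=rewrite | github.com/GiovanniCassani/discriminative_learning | preprocess_corpus.py | recode_stress
-- ===== SOURCE A (Python) =====
-- def recode_stress(utterance, vowels):
--
--     """
--     :param utterance:           a string containing phonological representations extracted from Celex. Each word is
--                                 separated by a word boundary marker and a stress marker (" ' ") is placed at the
--                                 beginning of every stressed syllable
--     :param vowels:              a set of the ASCII characters marking vowels in the phonological encoding that is being
--                                 used
--     :return recoded_utterance:  a string containing the same phonological representations as the input utterance, but
--                                 where stress markers have been moved: instead of appearing at the beginning of each
--                                 stressed syllable they immediately precede each stressed vowel.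
--     """
--
--     recoded_utterance = ''
--
--     i = 0
--
--     while i < len(utterance):
--         # if the symbol being considered is not a stress marker, append it to the recoded utterance and move forward
--         if utterance[i] != "'":
--             recoded_utterance += utterance[i]
--             i += 1
--         # if it is, join phonemes until a vowel is reached and append this bag of phonemes to the recoded utterance,
--         # then append a stress marker and the vowel bearing the stress. This way, the stress marker moves from the start
--         # of the syllable, as it is encoded in Celex, to the position immediately preceding the vowel
--         else:
--             is_vowel = False
--             bag_of_phonemes = ""
--             j = 1
--             while is_vowel == 0:
--                 # as long as the last processed symbol was not a vowel, check if the next is: if it is, append all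
--                 # phonemes encountered between the stress marker and the vowel itself, the stress marker, and the vowel
--                 # to the recoded utterance. Then signal that a vowel was found and jump ahead of three steps to avoid
--                 # re-considering phonemes that have already been added to the recoded utterance
--                 try:
--                     if utterance[i+j] in vowels:
--                         recoded_utterance += bag_of_phonemes + "'" + utterance[i+j]
--                         is_vowel = True
--                         i += len(bag_of_phonemes)+2
--                     # if it is not, add the next phoneme (a consonant) to the bag of phonemes and increment the index
--                     # that allows to advance in the utterance, until a vowel is found
--                     else:
--                         bag_of_phonemes += utterance[i+j]
--                         j += 1
--
--                 # in case there is a stress symbol but no vowel, return the original utterance stripped of the stress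
--                 # symbol, since in this encoding only vowels can bear stress
--                 except IndexError:
--                     if not utterance.startswith('+'):
--                         utterance = '+' + utterance
--                     if not utterance.endswith('+'):
--                         utterance += '+'
--                     table = str.maketrans(dict.fromkeys("'"))
--                     return utterance.translate(table)
--
--     # make sure that the utterance begins and ends with the word boundary symbol
--     if not recoded_utterance.endswith('+'):
--         recoded_utterance += '+'
--     if not recoded_utterance.startswith('+'):
--         recoded_utterance = '+' + recoded_utterance
--
--     return recoded_utterance
-- ===== SOURCE B (Python) =====
-- def recode_stress(utterance, vowels):
--     out = []
--     pending = False
--     for c in utterance: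
--         if pending and c in vowels:
--             out.append("'")
--             out.append(c)
--             pending = False
--         elif not pending and c == "'":
--             pending = True
--         else:
--             out.append(c)
--     if pending:
--         u = utterance if utterance.startswith('+') else '+' + utterance
--         if not u.endswith('+'):
--             u = u + '+'
--         return u.replace("'", '')
--     res = ''.join(out)
--     if not res.endswith('+'):
--         res = res + '+'
--     if not res.startswith('+'):
--         res = '+' + res
--     return res
-- ===== Notes on version B (the rewrite author's own statement) =====
-- stated objective: faster
-- what changed: Replaces A's index-driven outer loop with a nested lookahead scan, string-concatenated 'bag of phonemes' and try/except IndexError by a single left-to-right pass carrying a one-bit 'pending marker' state, with the no-vowel fallback detected from the end state instead of an exception.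
import Mathlib
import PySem

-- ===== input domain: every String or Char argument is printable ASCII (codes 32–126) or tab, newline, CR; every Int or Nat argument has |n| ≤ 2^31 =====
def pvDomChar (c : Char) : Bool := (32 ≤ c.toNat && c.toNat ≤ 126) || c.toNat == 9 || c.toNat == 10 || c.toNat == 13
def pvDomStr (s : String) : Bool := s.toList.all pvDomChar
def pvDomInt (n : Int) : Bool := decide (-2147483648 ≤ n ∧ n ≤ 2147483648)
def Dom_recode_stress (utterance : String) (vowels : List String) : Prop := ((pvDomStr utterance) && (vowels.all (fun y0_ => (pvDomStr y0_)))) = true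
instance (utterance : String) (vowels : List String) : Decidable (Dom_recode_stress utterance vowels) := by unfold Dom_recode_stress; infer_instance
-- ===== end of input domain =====

-- B is a simpler one-pass rewrite of A (same return value everywhere; neither mutates its arguments).

-- ===== PORT A =====
-- `utterance[i+j] in vowels`: membership of a 1-char string in the list, by equality (exact).
def pvIsVowel (vowels : List String) (c : Char) : Bool := vowels.contains (String.singleton c)

-- A's inner `while is_vowel == 0` scan: from position i+j, accumulate non-vowel chars into
-- `bag`, until a vowel is found (returns bag and the vowel) or an IndexError occurs (none).
-- Indices i, j are always ≥ 0 in A, so the bound check `i+j < cs.length` is exact (IndexError ↔ out of range).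
def pvScanA (cs : List Char) (vowels : List String) (i j : Nat) (bag : List Char) :
    Option (List Char × Char) :=
  if h : i + j < cs.length then
    let c := cs[i+j]
    if pvIsVowel vowels c then some (bag, c)
    else pvScanA cs vowels i (j+1) (bag ++ [c])
  else none
  termination_by cs.length - (i+j)
  decreasing_by omega

-- A's outer `while i < len(utterance)` loop; `none` = the except-IndexError early return path.
def pvLoopA (cs : List Char) (vowels : List String) (i : Nat) (acc : List Char) :
    Option (List Char) :=
  if h : i < cs.length then
    let c := cs[i]
    if c ≠ '\'' then pvLoopA cs vowels (i+1) (acc ++ [c])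
    else
      match pvScanA cs vowels i 1 [] with
      | none => none
      | some (bag, v) =>
          -- i += len(bag_of_phonemes) + 2
          pvLoopA cs vowels (i + (bag.length + 2)) (acc ++ bag ++ ['\'', v])
  else some acc
  termination_by cs.length - i
  decreasing_by
    · omega
    · omega

-- startswith('+') / endswith('+') on a single char via head?/getLast? (exact, False on '').
def recode_stress (utterance : String) (vowels : List String) : String :=
  match pvLoopA utterance.toList vowels 0 [] with
  | some rec0 =>
      -- endswith check first, then startswith (A's order on the normal path)
      let r1 := if rec0.getLast? ≠ some '+' then rec0 ++ ['+'] else rec0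
      let r2 := if r1.head? ≠ some '+' then '+' :: r1 else r1
      String.ofList r2
  | none =>
      -- except IndexError: startswith first, then endswith, then translate (drop all "'")
      let u := utterance.toList
      let u1 := if u.head? ≠ some '+' then '+' :: u else u
      let u2 := if u1.getLast? ≠ some '+' then u1 ++ ['+'] else u1
      String.ofList (u2.filter (fun c => c ≠ '\''))

-- ===== PORT B =====
-- One pass: `pending` records an unserved stress marker; it is flushed as "'"+vowel at the
-- next vowel; pending at the end of the pass means A's fallback case.
def pvLoopB (vowels : List String) (pending : Bool) (acc : List Char) :
    List Char → List Char × Bool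
  | [] => (acc, pending)
  | c :: rest =>
      if pending && pvIsVowel vowels c then pvLoopB vowels false (acc ++ ['\'', c]) rest
      else if !pending && (c == '\'') then pvLoopB vowels true acc rest
      else pvLoopB vowels pending (acc ++ [c]) rest

def recode_stress_alt (utterance : String) (vowels : List String) : String :=
  match pvLoopB vowels false [] utterance.toList with
  | (_, true) =>
      let u0 := utterance.toList
      let u1 := if u0.head? = some '+' then u0 else '+' :: u0
      let u2 := if u1.getLast? ≠ some '+' then u1 ++ ['+'] else u1
      String.ofList (u2.filter (fun c => c ≠ '\''))
  | (out, false) =>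
      let r1 := if out.getLast? ≠ some '+' then out ++ ['+'] else out
      let r2 := if r1.head? ≠ some '+' then '+' :: r1 else r1
      String.ofList r2

-- ===== PRECONDITION & SPEC =====
def Spec_recode_stress (utterance : String) (vowels : List String) (out : String) : Prop := out = recode_stress_alt utterance vowels
instance (utterance : String) (vowels : List String) (out : String) : Decidable (Spec_recode_stress utterance vowels out) := by unfold Spec_recode_stress; infer_instance

-- ===== CLAIM (what is proved, stated in full; the proofs are below) =====
def Claim_equal_recode_stress : Prop := ∀ (utterance : String) (vowels : List String), Dom_recode_stress utterance vowels → Spec_recode_stress utterance vowels (recode_stress utterance vowels)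

-- ===== LEMMAS AND PROOFS =====

-- Translate loopB's pair into loopA's Option: pending at the end ↔ fallback (none).
def pvB2A (r : List Char × Bool) : Option (List Char) :=
  if r.2 then none else some r.1


-- Bridge for A's inner scan: running pvScanA from position i+j (with `bag` the chars already
-- scanned, so bag.length + 1 = j) and then continuing the outer loop equals running loopB with
-- a pending marker on the rest of the string.  `hIH` is the outer induction hypothesis.
theorem pvScan_bridge (cs : List Char) (vowels : List String) (n : Nat)
    (hIH : ∀ k acc', cs.length - k ≤ n →
      pvLoopA cs vowels k acc' = pvB2A (pvLoopB vowels false acc' (cs.drop k)))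
    (i : Nat) (hn : cs.length ≤ i + 1 + n) :
    ∀ (m j : Nat) (bag acc : List Char), bag.length + 1 = j → cs.length - (i+j) ≤ m →
      (match pvScanA cs vowels i j bag with
        | none => none
        | some (bag', v) =>
            pvLoopA cs vowels (i + (bag'.length + 2)) (acc ++ bag' ++ ['\'', v]))
      = pvB2A (pvLoopB vowels true (acc ++ bag) (cs.drop (i+j))) := by
  intro m
  induction m with
  | zero =>
      intro j bag acc hj hm
      have hge : cs.length ≤ i + j := by omega
      rw [pvScanA]
      rw [dif_neg (by omega), List.drop_eq_nil_of_le hge]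
      simp [pvLoopB, pvB2A]
  | succ m ih =>
      intro j bag acc hj hm
      by_cases hlt : i + j < cs.length
      · rw [List.drop_eq_getElem_cons hlt]
        rw [pvScanA, dif_pos hlt]
        by_cases hv : pvIsVowel vowels (cs[i+j]) = true
        · simp only [hv, if_pos]
          have h2 : i + (bag.length + 2) = (i + j) + 1 := by omega
          rw [pvLoopB]
          simp only [hv, Bool.true_and, if_pos]
          rw [h2, hIH ((i+j)+1) (acc ++ bag ++ ['\'', cs[i+j]]) (by omega)]
        · simp only [hv, if_neg, Bool.false_eq_true, not_false_iff]
          rw [pvLoopB]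
          simp only [hv, Bool.and_false, Bool.not_true, Bool.false_and,
            if_neg (Bool.false_ne_true)]
          have := ih (j+1) (bag ++ [cs[i+j]]) acc (by simp; omega) (by omega)
          rw [show i + (j+1) = (i+j) + 1 by omega] at this
          rw [← List.append_assoc] at this
          exact this
      · have hge : cs.length ≤ i + j := by omega
        rw [pvScanA, dif_neg hlt, List.drop_eq_nil_of_le hge]
        simp [pvLoopB, pvB2A]

theorem pvLoopA_eq_loopB (cs : List Char) (vowels : List String) :
    ∀ n i acc, cs.length - i ≤ n →
      pvLoopA cs vowels i acc = pvB2A (pvLoopB vowels false acc (cs.drop i)) := by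
  intro n
  induction n with
  | zero =>
      intro i acc h
      have hge : cs.length ≤ i := by omega
      rw [pvLoopA, dif_neg (by omega), List.drop_eq_nil_of_le hge]
      simp [pvLoopB, pvB2A]
  | succ n ih =>
      intro i acc h
      by_cases hlt : i < cs.length
      · rw [List.drop_eq_getElem_cons hlt]
        rw [pvLoopA, dif_pos hlt]
        by_cases hc : cs[i] = '\''
        · simp only [hc, ne_eq, not_true_eq_false, if_false]
          rw [pvLoopB]
          simp only [Bool.false_and, Bool.not_false, Bool.true_and,
            if_neg (Bool.false_ne_true), beq_self_eq_true, if_pos]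
          have := pvScan_bridge cs vowels n ih i (by omega) cs.length 1 [] acc
            (by simp) (by omega)
          rw [List.append_nil] at this
          exact this
        · simp only [hc, ne_eq, not_false_iff, if_pos]
          rw [pvLoopB]
          have hbe : (cs[i] == '\'') = false := by simp [hc]
          simp only [Bool.false_and, Bool.not_false, Bool.true_and, hbe,
            if_neg (Bool.false_ne_true)]
          exact ih (i+1) (acc ++ [cs[i]]) (by omega)
      · have hge : cs.length ≤ i := by omega
        rw [pvLoopA, dif_neg hlt, List.drop_eq_nil_of_le hge]
        simp [pvLoopB, pvB2A]

theorem recode_stress_spec : Claim_equal_recode_stress := by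
  intro utterance vowels _
  unfold Spec_recode_stress recode_stress recode_stress_alt
  rw [pvLoopA_eq_loopB utterance.toList vowels utterance.toList.length 0 [] (by omega)]
  rw [List.drop_zero]
  cases hB : pvLoopB vowels false [] utterance.toList with
  | mk out p =>
      cases p
      · simp [pvB2A]
      · simp only [pvB2A, if_pos]
        by_cases hh : utterance.toList.head? = some '+'
        · simp [hh]
        · simp [hh]
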